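-- pv_equiv track=rewrite | github.com/OTOYO1020/ChatDev_Intermediate | WareHouse/D_147__20250506021212/xor_calculator.py | calculate_xor_sum
-- ===== SOURCE A (Python) =====
-- def calculate_xor_sum(N, A):
--     total_xor_sum = 0
--     MOD = 10**9 + 7
--     for i in range(N):  # Start from 0 to N-1 (0-based indexing)
--         for j in range(i + 1, N):  # j starts from i + 1 to N-1 (0-based indexing)
--             xor_value = A[i] ^ A[j]  # No need to adjust for 0-based indexing
--             total_xor_sum = (total_xor_sum + xor_value) % MOD  # Accumulate the result with modulo
--     return total_xor_sum
-- ===== SOURCE B (Python) =====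
-- def calculate_xor_sum(N, A):
--     MOD = 10 ** 9 + 7
--     vals = A[:max(N, 0)]  # the first N elements; a count below zero means none
--     # Split by sign; a negative x carries the bits of ~x plus a sign flag,
--     # since x ^ y = ~x ^ ~y when both are negative and x ^ y = -((~x ^ y) + 1)
--     # when exactly one is.
--     neg = [~x for x in vals if x < 0]
--     pos = [x for x in vals if x >= 0]
--     p, q = len(neg), len(pos)
--     total = -p * q
--     bits = max(neg + pos, default=0).bit_length()
--     for b in range(bits):
--         cn = sum((m >> b) & 1 for m in neg)
--         cp = sum((m >> b) & 1 for m in pos)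
--         same = cn * (p - cn) + cp * (q - cp)
--         cross = cn * (q - cp) + cp * (p - cn)
--         total += (same - cross) << b
--     return total % MOD
-- ===== Notes on version B (the rewrite author's own statement) =====
-- stated objective: faster
-- what changed: Replaces the O(N^2) double loop over pairs by per-bit counting on a sign/magnitude split (each bit contributes set_count*clear_count*2^bit; a negative x carries the bits of ~x plus a sign flag); Pre_ excludes only the inputs with 2 <= N and N > len(A), on which A raises IndexError.
import Mathlib
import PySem

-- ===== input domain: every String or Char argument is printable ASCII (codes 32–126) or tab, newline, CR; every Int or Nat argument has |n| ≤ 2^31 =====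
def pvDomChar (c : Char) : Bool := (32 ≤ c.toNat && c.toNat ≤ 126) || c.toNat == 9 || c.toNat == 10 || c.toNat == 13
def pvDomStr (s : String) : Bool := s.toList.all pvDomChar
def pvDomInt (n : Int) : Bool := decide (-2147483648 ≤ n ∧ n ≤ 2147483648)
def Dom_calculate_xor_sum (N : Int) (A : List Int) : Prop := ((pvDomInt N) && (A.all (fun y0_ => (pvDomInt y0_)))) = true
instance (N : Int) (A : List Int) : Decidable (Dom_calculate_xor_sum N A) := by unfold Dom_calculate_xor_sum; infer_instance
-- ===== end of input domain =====

-- B replaces A's O(N^2) pairwise loop by per-bit counting over a sign/magnitude split: O(N·log maxA).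

-- ===== PORT A =====
def calculate_xor_sum (N : Int) (A : List Int) : Int :=
  let MOD : Int := 10 ^ 9 + 7
  (PySem.List.pyRange 0 N 1).foldl (fun total_xor_sum i =>
    (PySem.List.pyRange (i + 1) N 1).foldl (fun total_xor_sum j =>
      let xor_value := PySem.Int.bxor (PySem.List.pyGetD A i 0) (PySem.List.pyGetD A j 0)
      PySem.Int.mod (total_xor_sum + xor_value) MOD) total_xor_sum) 0

-- ===== PORT B =====
def calculate_xor_sum_alt (N : Int) (A : List Int) : Int :=
  let MOD : Int := 10 ^ 9 + 7
  let vals := PySem.List.slice A none (some (max N 0))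
  let neg := (vals.filter (fun x => decide (x < 0))).map Int.not
  let pos := vals.filter (fun x => decide (0 ≤ x))
  let p : Int := neg.length
  let q : Int := pos.length
  let total : Int := -p * q
  let bits := PySem.Int.bitLength (PySem.List.maxD (neg ++ pos) id 0)
  let total := (List.range bits).foldl (fun (total : Int) (b : Nat) =>
    let cn : Int := (neg.map (fun (m : Int) => PySem.Int.band (m >>> b) 1)).sum
    let cp : Int := (pos.map (fun (m : Int) => PySem.Int.band (m >>> b) 1)).sum
    let same := cn * (p - cn) + cp * (q - cp)
    let cross := cn * (q - cp) + cp * (p - cn)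
    total + (same - cross) <<< b) total
  PySem.Int.mod total MOD

-- ===== PRECONDITION & SPEC =====
-- Exactly the inputs on which A returns: for 2 ≤ N > len(A) the inner loop reads A[j]
-- past the end and A raises IndexError (for N < 2 no pair is ever indexed).
def Pre_calculate_xor_sum (N : Int) (A : List Int) : Prop := N ≤ A.length ∨ N < 2
instance (N : Int) (A : List Int) : Decidable (Pre_calculate_xor_sum N A) := by unfold Pre_calculate_xor_sum; infer_instance
def pvWitness_calculate_xor_sum : Int × List Int := (3, [5, -2, 7])
def Spec_calculate_xor_sum (N : Int) (A : List Int) (out : Int) : Prop := out = calculate_xor_sum_alt N A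
instance (N : Int) (A : List Int) (out : Int) : Decidable (Spec_calculate_xor_sum N A out) := by unfold Spec_calculate_xor_sum; infer_instance

-- ===== CLAIM (what is proved, stated in full; the proofs are below) =====
def Claim_equal_calculate_xor_sum : Prop := ∀ (N : Int) (A : List Int), Dom_calculate_xor_sum N A → Pre_calculate_xor_sum N A → Spec_calculate_xor_sum N A (calculate_xor_sum N A)

-- ===== LEMMAS AND PROOFS =====

-- pairwise xor sum of a list (the common value both ports compute, before the final mod)
def pxs : List Int → Int
  | [] => 0
  | x :: xs => (xs.map (fun y => PySem.Int.bxor x y)).sum + pxs xs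

-- pairwise xor sum at the Nat level
def pxsN : List Nat → Nat
  | [] => 0
  | x :: xs => (xs.map (fun y => x ^^^ y)).sum + pxsN xs

-- sum of xors across two groups
def crossSum (u v : List Int) : Int := (u.map (fun a => (v.map (fun b => PySem.Int.bxor a b)).sum)).sum
def crossSumN (u v : List Nat) : Nat := (u.map (fun a => (v.map (fun b => a ^^^ b)).sum)).sum

---------------------------------------------------------------- A side

theorem foldl_mod_inner {β : Type} (l : List β) (f : β → Int) (s : Int)
    (h0 : 0 ≤ s) (h1 : s < 1000000007) :
    l.foldl (fun t x => PySem.Int.mod (t + f x) 1000000007) s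
      = (s + (l.map f).sum) % 1000000007 := by
  induction l generalizing s with
  | nil => simp [Int.emod_eq_of_lt h0 h1]
  | cons x xs ih =>
    simp only [List.foldl_cons, List.map_cons, List.sum_cons]
    rw [PySem.Int.mod_eq_emod_of_pos (by norm_num)]
    rw [ih _ (Int.emod_nonneg _ (by norm_num)) (Int.emod_lt_of_pos _ (by norm_num))]
    rw [Int.emod_add_emod]
    ring_nf

theorem foldl_mod_outer {α β : Type} (l : List α) (g : α → List β) (f : α → β → Int) (s : Int)
    (h0 : 0 ≤ s) (h1 : s < 1000000007) :
    l.foldl (fun t i => (g i).foldl (fun t j => PySem.Int.mod (t + f i j) 1000000007) t) s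
      = (s + (l.map (fun i => ((g i).map (f i)).sum)).sum) % 1000000007 := by
  induction l generalizing s with
  | nil => simp [Int.emod_eq_of_lt h0 h1]
  | cons x xs ih =>
    simp only [List.foldl_cons, List.map_cons, List.sum_cons]
    rw [foldl_mod_inner _ _ _ h0 h1]
    rw [ih _ (Int.emod_nonneg _ (by norm_num)) (Int.emod_lt_of_pos _ (by norm_num))]
    rw [Int.emod_add_emod]
    ring_nf

theorem pxs_append_singleton (L : List Int) (a : Int) :
    pxs (L ++ [a]) = pxs L + (L.map (fun x => PySem.Int.bxor x a)).sum := by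
  induction L with
  | nil => simp [pxs]
  | cons x xs ih =>
    simp only [List.cons_append, pxs, List.map_append, List.sum_append, List.map_cons, List.sum_cons, ih]
    simp
    ring

theorem take_eq_map_range {α : Type} [Inhabited α] (A : List α) (n : Nat) (hn : n ≤ A.length) :
    A.take n = (List.range n).map (fun k => A.getD k default) := by
  apply List.ext_getElem
  · simp [hn]
  · intro i h1 h2
    simp at h1 ⊢
    rw [List.getElem?_eq_getElem (by omega)]
    simp

-- the double range sum is the pairwise xor sum of the first n elements
theorem tri_eq_pxs (A : List Int) (n : Nat) (hn : n ≤ A.length) :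
    ((List.map (fun i => ((PySem.List.pyRange (i + 1) (n : Int) 1).map
        (fun j => PySem.Int.bxor (PySem.List.pyGetD A i 0) (PySem.List.pyGetD A j 0))).sum)
      (PySem.List.pyRange 0 (n : Int) 1)).sum) = pxs (A.take n) := by
  induction n with
  | zero => simp [pxs, PySem.List.pyRange]
  | succ n ih =>
    have hcast : ((n+1 : Nat) : Int) = (n:Int) + 1 := by push_cast; ring
    rw [hcast]
    rw [PySem.List.pyRange_one_succ_right (by positivity)]
    have hrow : ∀ i ∈ PySem.List.pyRange 0 (n:Int) 1,
        (List.map (fun j => PySem.Int.bxor (PySem.List.pyGetD A i 0) (PySem.List.pyGetD A j 0))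
          (PySem.List.pyRange (i + 1) ((n:Int) + 1) 1)).sum
        = (List.map (fun j => PySem.Int.bxor (PySem.List.pyGetD A i 0) (PySem.List.pyGetD A j 0))
          (PySem.List.pyRange (i + 1) (n:Int) 1)).sum
          + PySem.Int.bxor (PySem.List.pyGetD A i 0) (PySem.List.pyGetD A (n:Int) 0) := by
      intro i hi
      rw [PySem.List.mem_pyRange_one] at hi
      rw [PySem.List.pyRange_one_succ_right (by omega)]
      simp
    rw [List.map_append, List.sum_append]
    rw [List.map_congr_left hrow]
    rw [PySem.List.sum_map_add_int]
    rw [ih (by omega)]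
    have htake : A.take (n+1) = A.take n ++ [A.getD n 0] := by
      rw [List.take_succ, List.getElem?_eq_getElem (by omega)]
      simp [List.getD_eq_getElem?_getD, List.getElem?_eq_getElem (show n < A.length by omega)]
    rw [htake, pxs_append_singleton]
    have hlast : (List.map (fun i => (List.map (fun j => PySem.Int.bxor (PySem.List.pyGetD A i 0)
        (PySem.List.pyGetD A j 0)) (PySem.List.pyRange (i + 1) ((n:Int) + 1) 1)).sum) [(n:Int)]).sum = 0 := by
      simp
    rw [hlast]
    have hcol : (List.map (fun i => PySem.Int.bxor (PySem.List.pyGetD A i 0) (PySem.List.pyGetD A (n:Int) 0))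
        (PySem.List.pyRange 0 (n:Int) 1)).sum
        = (List.map (fun x => PySem.Int.bxor x (PySem.List.pyGetD A (n:Int) 0)) (A.take n)).sum := by
      rw [PySem.List.pyRange_zero_natCast, List.map_map, take_eq_map_range A n (by omega), List.map_map]
      congr 1
      apply List.map_congr_left
      intro k hk
      simp at hk
      simp [PySem.List.pyGetD_natCast]
    rw [hcol]
    have hgd : PySem.List.pyGetD A (n:Int) 0 = A.getD n 0 := by simp [PySem.List.pyGetD_natCast]
    rw [hgd]
    ring

theorem portA_eq (A : List Int) (n : Nat) (hn : n ≤ A.length) :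
    calculate_xor_sum (n : Int) A = (pxs (A.take n)) % 1000000007 := by
  unfold calculate_xor_sum
  simp only []
  rw [show ((10:Int)^9+7) = 1000000007 from by norm_num]
  rw [foldl_mod_outer (PySem.List.pyRange 0 (n:Int) 1)
      (fun i => PySem.List.pyRange (i + 1) (n:Int) 1)
      (fun i j => PySem.Int.bxor (PySem.List.pyGetD A i 0) (PySem.List.pyGetD A j 0))
      0 (by norm_num) (by norm_num)]
  rw [tri_eq_pxs A n hn, zero_add]

---------------------------------------------------------------- B side: sign split

theorem bxor_negneg (x y : Int) (hx : x < 0) (hy : y < 0) :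
    PySem.Int.bxor x y = ((Int.not x).toNat ^^^ (Int.not y).toNat : Nat) := by
  have hnx : Int.not x = -x - 1 := by cases x <;> simp [Int.not] <;> omega
  have hny : Int.not y = -y - 1 := by cases y <;> simp [Int.not] <;> omega
  simp only [PySem.Int.bxor, if_neg (by omega : ¬ (0:Int) ≤ x), if_neg (by omega : ¬ (0:Int) ≤ y), hnx, hny]

theorem bxor_mixed (x y : Int) (hx : x < 0) (hy : 0 ≤ y) :
    PySem.Int.bxor x y = -(((Int.not x).toNat ^^^ y.toNat : Nat) : Int) - 1 := by
  have hnx : Int.not x = -x - 1 := by cases x <;> simp [Int.not] <;> omega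
  simp only [PySem.Int.bxor, if_neg (by omega : ¬ (0:Int) ≤ x), if_pos hy, hnx]

theorem sum_map_filter_split {α : Type} (l : List α) (p : α → Bool) (f : α → Int) :
    (l.map f).sum = ((l.filter p).map f).sum + ((l.filter (fun x => !p x)).map f).sum := by
  induction l with
  | nil => simp
  | cons x xs ih =>
    by_cases h : p x <;> simp [h, ih] <;> ring

theorem crossSum_cons_right (u : List Int) (x : Int) (v : List Int) :
    crossSum u (x :: v) = (u.map (fun a => PySem.Int.bxor a x)).sum + crossSum u v := by
  simp only [crossSum, List.map_cons, List.sum_cons]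
  induction u with
  | nil => simp
  | cons a u ih => simp only [List.map_cons, List.sum_cons] at *; rw [ih]; ring

-- partition of the pairwise sum by sign
theorem pxs_partition (L : List Int) :
    pxs L = pxs (L.filter (fun x => decide (x < 0))) + pxs (L.filter (fun x => decide (0 ≤ x)))
          + crossSum (L.filter (fun x => decide (x < 0))) (L.filter (fun x => decide (0 ≤ x))) := by
  induction L with
  | nil => simp [pxs, crossSum]
  | cons x xs ih =>
    have hsplit := sum_map_filter_split xs (fun y => decide (y < 0)) (fun y => PySem.Int.bxor x y)
    have hnot : (fun y : Int => !decide (y < 0)) = (fun y : Int => decide (0 ≤ y)) := by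
      funext y; by_cases h : y < 0 <;> simp [h] <;> omega
    rw [hnot] at hsplit
    by_cases h : x < 0
    · have h2 : decide (0 ≤ x) = false := by simp; omega
      simp only [pxs, List.filter_cons, h, decide_true, h2, if_pos, Bool.false_eq_true,
        ite_false, ih, hsplit, crossSum, List.map_cons, List.sum_cons]
      ring
    · have h1 : decide (x < 0) = false := by simp; omega
      have h2 : decide (0 ≤ x) = true := by simp; omega
      simp only [pxs, List.filter_cons, h1, h2, Bool.false_eq_true, ite_false, ite_true,
        ih, hsplit]
      rw [crossSum_cons_right]
      have hc : ∀ a : Int, PySem.Int.bxor a x = PySem.Int.bxor x a := fun a => PySem.Int.bxor_comm a x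
      simp only [hc]
      ring

theorem row_sum_aux (c : Nat) (v : List Int) :
    (List.map (fun y => -((c ^^^ y.toNat : Nat) : Int) - 1) v).sum
      = -((List.map (fun y => (((c ^^^ y.toNat : Nat)) : Int)) v).sum) - v.length := by
  induction v with
  | nil => simp
  | cons b bs ihb =>
    simp only [List.map_cons, List.sum_cons, List.length_cons] at *
    rw [ihb]; push_cast; ring

theorem crossSum_negpos (u v : List Int) (hu : ∀ x ∈ u, x < 0) (hv : ∀ y ∈ v, 0 ≤ y) :
    crossSum u v = -(crossSumN (u.map (fun x => (Int.not x).toNat)) (v.map Int.toNat) : Int)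
                   - (u.length : Int) * v.length := by
  induction u with
  | nil => simp [crossSum, crossSumN]
  | cons x xs ih =>
    simp only [crossSum, crossSumN, List.map_cons, List.sum_cons, List.map_map] at *
    rw [ih (fun y hy => hu y (List.mem_cons_of_mem _ hy))]
    have hrow : ∀ y ∈ v, PySem.Int.bxor x y = -(((Int.not x).toNat ^^^ y.toNat : Nat) : Int) - 1 := by
      intro y hy; exact bxor_mixed x y (hu x (by simp)) (hv y hy)
    rw [List.map_congr_left hrow]
    rw [row_sum_aux (Int.not x).toNat v]
    push_cast
    rw [List.comp_map]
    simp [Function.comp_def]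
    ring

theorem pxs_neg_group (u : List Int) (hu : ∀ x ∈ u, x < 0) :
    pxs u = (pxsN (u.map (fun x => (Int.not x).toNat)) : Int) := by
  induction u with
  | nil => simp [pxs, pxsN]
  | cons x xs ih =>
    simp only [pxs, List.map_cons, pxsN, List.map_map]
    rw [ih (fun y hy => hu y (List.mem_cons_of_mem _ hy))]
    have : ∀ y ∈ xs, PySem.Int.bxor x y = (((Int.not x).toNat ^^^ (Int.not y).toNat : Nat) : Int) := by
      intro y hy
      exact bxor_negneg x y (hu x (by simp)) (hu y (by simp [hy]))
    rw [List.map_congr_left this]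
    push_cast
    rw [List.comp_map]
    simp [Function.comp_def]

theorem pxs_pos_group (v : List Int) (hv : ∀ y ∈ v, 0 ≤ y) :
    pxs v = (pxsN (v.map Int.toNat) : Int) := by
  induction v with
  | nil => simp [pxs, pxsN]
  | cons x xs ih =>
    simp only [pxs, List.map_cons, pxsN, List.map_map]
    rw [ih (fun y hy => hv y (List.mem_cons_of_mem _ hy))]
    have : ∀ y ∈ xs, PySem.Int.bxor x y = ((x.toNat ^^^ y.toNat : Nat) : Int) := by
      intro y hy
      exact PySem.Int.bxor_of_nonneg (hv x (by simp)) (hv y (by simp [hy]))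
    rw [List.map_congr_left this]
    push_cast
    rw [List.comp_map]
    simp [Function.comp_def]

---------------------------------------------------------------- B side: per-bit counting (Nat level)

theorem nat_rep (k : Nat) : ∀ n < 2^k, n = ∑ i ∈ Finset.range k, 2^i * (n.testBit i).toNat := by
  induction k with
  | zero => intro n h; interval_cases n; simp
  | succ k ih =>
    intro n h
    rw [Finset.sum_range_succ']
    have h2 : n / 2 < 2 ^ k := by
      have := Nat.pow_succ 2 k ▸ h; omega
    have := ih (n/2) h2
    simp only [Nat.testBit_succ]
    calc n = 2 * (n/2) + n % 2 := by omega
    _ = _ := by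
        rw [Nat.mul_comm 2]
        conv_lhs => rw [this]
        rw [Finset.sum_mul]
        simp only [Nat.testBit_zero, Nat.pow_succ, Nat.pow_zero, Nat.one_mul]
        have e1 : ∑ i ∈ Finset.range k, 2 ^ i * ((n / 2).testBit i).toNat * 2
            = ∑ x ∈ Finset.range k, 2 ^ x * 2 * ((n / 2).testBit x).toNat := by
          apply Finset.sum_congr rfl; intro i _; ring
        rw [e1]
        congr 1
        rcases Nat.mod_two_eq_zero_or_one n with h | h <;> simp [h]

theorem xor_expand_int (k x y : Nat) (hx : x < 2^k) (hy : y < 2^k) :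
    ((x ^^^ y : Nat) : Int) = ∑ b ∈ Finset.range k, (2^b : Int) * (((x.testBit b).xor (y.testBit b)).toNat : Int) := by
  have hxy : x ^^^ y < 2^k := Nat.xor_lt_two_pow hx hy
  have := nat_rep k (x ^^^ y) hxy
  calc ((x ^^^ y : Nat) : Int) = ((∑ i ∈ Finset.range k, 2^i * ((x ^^^ y).testBit i).toNat : Nat) : Int) := by
        rw [← this]
  _ = _ := by
        push_cast
        apply Finset.sum_congr rfl
        intro b _
        rw [Nat.testBit_xor]

theorem sum_exchange {α : Type} (l : List α) (K : Nat) (g : α → Nat → Int) :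
    (l.map (fun y => ∑ b ∈ Finset.range K, g y b)).sum = ∑ b ∈ Finset.range K, (l.map (fun y => g y b)).sum := by
  induction l with
  | nil => simp
  | cons x xs ih => simp [ih, Finset.sum_add_distrib]

theorem sum_toNat_count (l : List Nat) (p : Nat → Bool) :
    (l.map (fun y => ((p y).toNat : Int))).sum = (l.countP p : Int) := by
  rw [← PySem.List.sum_map_ite_one_zero p l]
  congr 1
  apply List.map_congr_left
  intro y _
  by_cases h : p y <;> simp [h]

theorem countP_not {α : Type} (l : List α) (q : α → Bool) : l.countP (fun y => !q y) = l.length - l.countP q := by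
  induction l with
  | nil => simp
  | cons x xs ih =>
    have := List.countP_le_length (l := xs) (p := q)
    by_cases h : q x <;> simp [h, ih] <;> omega

theorem row_per_bit (k x : Nat) (xs : List Nat) (hx : x < 2^k) (h : ∀ m ∈ xs, m < 2^k) :
    ((xs.map (fun y => x ^^^ y)).sum : Int)
      = ∑ b ∈ Finset.range k, (2^b : Int) * ((xs.countP (fun y => (x.testBit b).xor (y.testBit b)) : Nat) : Int) := by
  rw [Nat.cast_list_sum, List.map_map]
  have : ∀ y ∈ xs, ((Nat.cast ∘ fun y => x ^^^ y) y : Int)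
      = ∑ b ∈ Finset.range k, (2^b : Int) * (((x.testBit b).xor (y.testBit b)).toNat : Int) := by
    intro y hy
    exact xor_expand_int k x y hx (h y hy)
  rw [List.map_congr_left this, sum_exchange]
  apply Finset.sum_congr rfl
  intro b _
  rw [List.sum_map_mul_left, sum_toNat_count]

theorem pxsN_per_bit (k : Nat) (ms : List Nat) (h : ∀ m ∈ ms, m < 2^k) :
    (pxsN ms : Int) = ∑ b ∈ Finset.range k, (2^b : Int) *
      ((ms.countP (fun m => m.testBit b) : Int) * ((ms.length : Int) - (ms.countP (fun m => m.testBit b) : Int))) := by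
  induction ms with
  | nil => simp [pxsN]
  | cons x xs ih =>
    simp only [pxsN, Nat.cast_add]
    rw [row_per_bit k x xs (h x (by simp)) (fun m hm => h m (by simp [hm]))]
    rw [ih (fun m hm => h m (by simp [hm]))]
    rw [← Finset.sum_add_distrib]
    apply Finset.sum_congr rfl
    intro b _
    rw [← Int.mul_add]
    congr 1
    have hle := List.countP_le_length (l := xs) (p := fun m => m.testBit b)
    by_cases hx : x.testBit b
    · have hcnt : (xs.countP (fun y => (x.testBit b).xor (y.testBit b))) = xs.length - xs.countP (fun m => m.testBit b) := by
        rw [← countP_not xs (fun m => m.testBit b)]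
        apply List.countP_congr
        intro y _
        simp [hx]
      rw [hcnt, List.countP_cons]
      simp only [hx, List.length_cons]
      push_cast [Nat.cast_sub hle]
      ring
    · have hcnt : (xs.countP (fun y => (x.testBit b).xor (y.testBit b))) = xs.countP (fun m => m.testBit b) := by
        apply List.countP_congr
        intro y _
        simp [hx]
      rw [hcnt, List.countP_cons]
      simp only [hx, List.length_cons]
      push_cast
      ring

theorem crossSumN_per_bit (k : Nat) (u v : List Nat) (hu : ∀ m ∈ u, m < 2^k) (hv : ∀ m ∈ v, m < 2^k) :
    (crossSumN u v : Int) = ∑ b ∈ Finset.range k, (2^b : Int) *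
      ((u.countP (fun m => m.testBit b) : Int) * ((v.length : Int) - (v.countP (fun m => m.testBit b) : Int))
       + ((u.length : Int) - (u.countP (fun m => m.testBit b) : Int)) * (v.countP (fun m => m.testBit b) : Int)) := by
  induction u with
  | nil => simp [crossSumN]
  | cons x xs ih =>
    simp only [crossSumN, List.map_cons, List.sum_cons, Nat.cast_add] at *
    rw [row_per_bit k x v (hu x (by simp)) hv]
    rw [ih (fun m hm => hu m (by simp [hm]))]
    rw [← Finset.sum_add_distrib]
    apply Finset.sum_congr rfl
    intro b _
    rw [← Int.mul_add]
    congr 1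
    have hle := List.countP_le_length (l := v) (p := fun m => m.testBit b)
    by_cases hx : x.testBit b
    · have hcnt : (v.countP (fun y => (x.testBit b).xor (y.testBit b))) = v.length - v.countP (fun m => m.testBit b) := by
        rw [← countP_not v (fun m => m.testBit b)]
        apply List.countP_congr
        intro y _
        simp [hx]
      rw [hcnt, List.countP_cons]
      simp only [hx, List.length_cons]
      push_cast [Nat.cast_sub hle]
      ring
    · have hcnt : (v.countP (fun y => (x.testBit b).xor (y.testBit b))) = v.countP (fun m => m.testBit b) := by
        apply List.countP_congr
        intro y _
        simp [hx]
      rw [hcnt, List.countP_cons]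
      simp only [hx, List.length_cons]
      push_cast
      ring

---------------------------------------------------------------- B side: reading the port

theorem shift_band_testBit (m b : Nat) : PySem.Int.band ((m : Int) >>> b) 1 = ((m.testBit b).toNat : Int) := by
  have h1 : (m : Int) >>> b = ((m >>> b : Nat) : Int) := by simp
  have h2 : PySem.Int.band ((m : Int) >>> b) 1 = (((m >>> b) &&& 1 : Nat) : Int) := by
    rw [h1]; exact_mod_cast PySem.Int.band_natCast (m >>> b) 1
  rw [h2]
  congr 1
  rcases Nat.mod_two_eq_zero_or_one (m / 2^b) with h | h <;>
    simp [h, Nat.testBit, Nat.shiftRight_eq_div_pow, Nat.and_one_is_mod]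

theorem count_eq (l : List Nat) (b : Nat) :
    ((l.map (fun m : Nat => (m : Int))).map (fun m : Int => PySem.Int.band (m >>> b) 1)).sum
      = (l.countP (fun m => m.testBit b) : Int) := by
  rw [List.map_map]
  have h : ∀ m ∈ l, ((fun m : Int => PySem.Int.band (m >>> b) 1) ∘ fun m : Nat => (m : Int)) m
      = ((m.testBit b).toNat : Int) := by
    intro m _
    exact shift_band_testBit m b
  rw [List.map_congr_left h, ← PySem.List.sum_map_ite_one_zero]
  congr 1
  apply List.map_congr_left
  intro y _
  by_cases hb : y.testBit b <;> simp [hb]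

theorem max?_ne_none (xs : List Int) (hne : xs ≠ []) : PySem.List.max? xs id ≠ none := by
  have step : ∀ (f : Option Int → Int → Option Int), (∀ o x, o ≠ none → f o x ≠ none) →
      ∀ (l : List Int) (acc : Option Int), acc ≠ none → List.foldl f acc l ≠ none := by
    intro f hf l
    induction l with
    | nil => intro acc ha; simpa using ha
    | cons c cs ihc => intro acc ha; simp only [List.foldl_cons]; exact ihc _ (hf _ _ ha)
  cases xs with
  | nil => simp at hne
  | cons a as =>
    unfold PySem.List.max?
    simp only [List.foldl_cons]
    refine step _ ?_ as (some a) (by simp)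
    intro o x ho
    match o with
    | none => simp at ho
    | some m => simp only; split <;> simp

theorem max_bound (xs : List Int) (hx : ∀ x ∈ xs, 0 ≤ x) :
    ∀ x ∈ xs, x.toNat < 2 ^ PySem.Int.bitLength (PySem.List.maxD xs id 0) := by
  intro x hxm
  have hmax : x ≤ PySem.List.maxD xs id 0 := by
    unfold PySem.List.maxD
    cases h : PySem.List.max? xs id with
    | none =>
      exact absurd h (max?_ne_none xs (by rintro rfl; simp at hxm))
    | some m =>
      have := PySem.List.max?_isMax h x hxm
      simpa using this
  have h2 := PySem.Int.lt_two_pow_bitLength (PySem.List.maxD xs id 0)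
  have h0 : 0 ≤ x := hx x hxm
  omega

theorem portB_eq (A : List Int) (n : Nat) (_hn : n ≤ A.length) :
    calculate_xor_sum_alt (n : Int) A = (pxs (A.take n)) % 1000000007 := by
  unfold calculate_xor_sum_alt
  simp only []
  rw [show ((10:Int)^9+7) = 1000000007 from by norm_num]
  rw [show max ((n : Nat) : Int) 0 = ((n : Nat) : Int) from max_eq_left (by positivity)]
  rw [PySem.List.slice_to_natCast]
  rw [PySem.List.foldl_add]
  rw [PySem.Int.mod_eq_emod_of_pos (by norm_num)]
  congr 1
  -- names
  set L := A.take n with hL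
  set NN : List Nat := (L.filter (fun x => decide (x < 0))).map (fun x => (Int.not x).toNat) with hNN
  set PP : List Nat := (L.filter (fun x => decide (0 ≤ x))).map Int.toNat with hPP
  have hUneg : ∀ x ∈ L.filter (fun x => decide (x < 0)), x < 0 := by
    intro x hx; have := List.of_mem_filter hx; simpa using this
  have hVpos : ∀ x ∈ L.filter (fun x => decide (0 ≤ x)), 0 ≤ x := by
    intro x hx; have := List.of_mem_filter hx; simpa using this
  have hU : (L.filter (fun x => decide (x < 0))).map Int.not = NN.map (fun m : Nat => (m : Int)) := by
    rw [hNN, List.map_map]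
    apply List.map_congr_left
    intro x hx
    have hneg := hUneg x hx
    have : Int.not x = -x - 1 := by cases x <;> simp [Int.not] <;> omega
    simp only [Function.comp_def]
    omega
  have hV : L.filter (fun x => decide (0 ≤ x)) = PP.map (fun m : Nat => (m : Int)) := by
    rw [hPP, List.map_map]
    conv_lhs => rw [← List.map_id (L.filter (fun x => decide (0 ≤ x)))]
    apply List.map_congr_left
    intro x hx
    have := hVpos x hx
    simp only [Function.comp_def, id]
    omega
  rw [hU, hV]
  set k := PySem.Int.bitLength (PySem.List.maxD (NN.map (fun m : Nat => (m : Int)) ++ PP.map (fun m : Nat => (m : Int))) id 0) with hk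
  have hbound : ∀ x ∈ NN.map (fun m : Nat => (m : Int)) ++ PP.map (fun m : Nat => (m : Int)), 0 ≤ x := by
    intro x hx
    rcases List.mem_append.mp hx with h | h <;> · obtain ⟨m, _, rfl⟩ := List.mem_map.mp h; positivity
  have hNNlt : ∀ m ∈ NN, m < 2^k := by
    intro m hm
    have hmem : (m : Int) ∈ NN.map (fun m : Nat => (m : Int)) ++ PP.map (fun m : Nat => (m : Int)) := by
      exact List.mem_append.mpr (Or.inl (List.mem_map.mpr ⟨m, hm, rfl⟩))
    have := max_bound _ hbound _ hmem
    simpa using this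
  have hPPlt : ∀ m ∈ PP, m < 2^k := by
    intro m hm
    have hmem : (m : Int) ∈ NN.map (fun m : Nat => (m : Int)) ++ PP.map (fun m : Nat => (m : Int)) := by
      exact List.mem_append.mpr (Or.inr (List.mem_map.mpr ⟨m, hm, rfl⟩))
    have := max_bound _ hbound _ hmem
    simpa using this
  -- left side: list-range sum to Finset sum, counts, shifts
  have hsum : ((List.range k).map (fun (b : Nat) =>
      ((((NN.map (fun m : Nat => (m : Int))).map (fun (m : Int) => PySem.Int.band (m >>> b) 1)).sum *
        (((NN.map (fun m : Nat => (m : Int))).length : Int) - ((NN.map (fun m : Nat => (m : Int))).map (fun (m : Int) => PySem.Int.band (m >>> b) 1)).sum) +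
        ((PP.map (fun m : Nat => (m : Int))).map (fun (m : Int) => PySem.Int.band (m >>> b) 1)).sum *
        (((PP.map (fun m : Nat => (m : Int))).length : Int) - ((PP.map (fun m : Nat => (m : Int))).map (fun (m : Int) => PySem.Int.band (m >>> b) 1)).sum)) -
       (((NN.map (fun m : Nat => (m : Int))).map (fun (m : Int) => PySem.Int.band (m >>> b) 1)).sum *
        (((PP.map (fun m : Nat => (m : Int))).length : Int) - ((PP.map (fun m : Nat => (m : Int))).map (fun (m : Int) => PySem.Int.band (m >>> b) 1)).sum) +
        ((PP.map (fun m : Nat => (m : Int))).map (fun (m : Int) => PySem.Int.band (m >>> b) 1)).sum *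
        (((NN.map (fun m : Nat => (m : Int))).length : Int) - ((NN.map (fun m : Nat => (m : Int))).map (fun (m : Int) => PySem.Int.band (m >>> b) 1)).sum))) <<< b)).sum
      = ∑ b ∈ Finset.range k,
        ((((NN.countP (fun m => m.testBit b) : Int) * ((NN.length : Int) - (NN.countP (fun m => m.testBit b) : Int)) +
          (PP.countP (fun m => m.testBit b) : Int) * ((PP.length : Int) - (PP.countP (fun m => m.testBit b) : Int))) -
         ((NN.countP (fun m => m.testBit b) : Int) * ((PP.length : Int) - (PP.countP (fun m => m.testBit b) : Int)) +
          (PP.countP (fun m => m.testBit b) : Int) * ((NN.length : Int) - (NN.countP (fun m => m.testBit b) : Int)))) * 2^b) := by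
    rw [show ∀ (f : Nat → Int) (k : Nat), ((List.range k).map f).sum = ∑ b ∈ Finset.range k, f b
        from fun f k => Int.neg_inj.mp rfl]
    apply Finset.sum_congr rfl
    intro b _
    rw [count_eq NN b, count_eq PP b, Int.shiftLeft_eq]
    simp [List.length_map]
  rw [hsum]
  -- right side
  rw [pxs_partition L, pxs_neg_group _ hUneg, pxs_pos_group _ hVpos, crossSum_negpos _ _ hUneg hVpos]
  rw [← hNN, ← hPP]
  rw [pxsN_per_bit k NN hNNlt, pxsN_per_bit k PP hPPlt, crossSumN_per_bit k NN PP hNNlt hPPlt]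
  have hlen1 : ((L.filter (fun x => decide (x < 0))).length : Int) = (NN.length : Int) := by simp [hNN]
  have hlen2 : ((L.filter (fun x => decide (0 ≤ x))).length : Int) = (PP.length : Int) := by simp [hPP]
  rw [hlen1, hlen2]
  simp only [List.length_map]
  have e2 : ∀ (s1 s2 s3 a1 a2 : Int), s1 = s2 - s3 → -a1 * a2 + s1 = s2 + (-s3 - a1 * a2) := by
    intro s1 s2 s3 a1 a2 h
    linarith
  apply e2
  rw [← Finset.sum_add_distrib, ← Finset.sum_sub_distrib]
  apply Finset.sum_congr rfl
  intro b _
  ring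

theorem pyRange_nonpos (N : Int) (h : N ≤ 0) : PySem.List.pyRange 0 N 1 = [] := by
  rw [List.eq_nil_iff_forall_not_mem]
  intro x hx; rw [PySem.List.mem_pyRange_one] at hx; omega

theorem both_zero (N : Int) (A : List Int) (h : N < 0) :
    calculate_xor_sum N A = 0 ∧ calculate_xor_sum_alt N A = 0 := by
  constructor
  · unfold calculate_xor_sum
    simp only []
    rw [pyRange_nonpos N (by omega)]
    simp
  · unfold calculate_xor_sum_alt
    simp only []
    rw [show max N 0 = (((0:Nat) : Nat) : Int) from by simp; omega]
    rw [PySem.List.slice_to_natCast]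
    simp only [List.take_zero, List.filter_nil, List.map_nil, List.length_nil, List.nil_append]
    rw [show PySem.List.maxD ([] : List Int) id 0 = 0 from rfl]
    rw [PySem.Int.bitLength_zero]
    simp only [List.range_zero, List.foldl_nil]
    rw [PySem.Int.mod_eq_emod_of_pos (by norm_num)]
    norm_num

-- ===== VERDICT (by name: the statement is the Claim_ definition above) =====
theorem calculate_xor_sum_spec : Claim_equal_calculate_xor_sum := by
  intro N A _ hpre
  unfold Spec_calculate_xor_sum
  by_cases hneg : N < 0
  · obtain ⟨ha, hb⟩ := both_zero N A hneg
    rw [ha, hb]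
  · obtain ⟨n, rfl⟩ : ∃ n : Nat, N = (n : Int) := ⟨N.toNat, (Int.toNat_of_nonneg (by omega)).symm⟩
    by_cases hn : n ≤ A.length
    · rw [portA_eq A n hn, portB_eq A n hn]
    · have h1 : n = 1 ∧ A.length = 0 := by
        rcases hpre with h | h
        · exact absurd (by exact_mod_cast h) hn
        · have : n < 2 := by exact_mod_cast h
          omega
      obtain ⟨rfl, hlen⟩ := h1
      obtain rfl : A = [] := List.length_eq_zero_iff.mp hlen
      decide
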